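-- pv_equiv track=rewrite | github.com/Bear19997777/ShopifyCrawler | websiteClassify.py | classify_website
-- ===== SOURCE A (Python) =====
-- def classify_website(keywords):
--     categories = {
--         "e-commerce": ["shop", "buy", "product", "cart"],
--         "news": ["news", "breaking", "headline", "report"],
--         "blog": ["blog", "post", "comment", "subscribe"],
--         "social media": ["profile", "friend", "share", "like"]
--         # 可以添加更多類別和對應的關鍵詞
--     }
--
--     category_scores = {category: 0 for category in categories}
--
--     for keyword, _ in keywords:
--         for category, category_keywords in categories.items():
--             if keyword.lower() in category_keywords:
--                 category_scores[category] += 1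
--
--     return max(category_scores, key=category_scores.get)
-- ===== SOURCE B (Python) =====
-- def classify_website(keywords):
--     categories = {
--         "e-commerce": ["shop", "buy", "product", "cart"],
--         "news": ["news", "breaking", "headline", "report"],
--         "blog": ["blog", "post", "comment", "subscribe"],
--         "social media": ["profile", "friend", "share", "like"]
--     }
--     index = {kw: cat for cat, kws in categories.items() for kw in kws}
--     scores = {cat: 0 for cat in categories}
--     for keyword, _ in keywords:
--         cat = index.get(keyword.lower())
--         if cat is not None:
--             scores[cat] += 1
--     return max(scores, key=scores.get)
-- ===== Notes on version B (the rewrite author's own statement) =====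
-- stated objective: idiomatic
-- what changed: Replaces the inner scan over all categories per keyword by an inverted keyword-to-category index built once, so each keyword is scored by a single dict lookup instead of four list membership tests.
import Mathlib
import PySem

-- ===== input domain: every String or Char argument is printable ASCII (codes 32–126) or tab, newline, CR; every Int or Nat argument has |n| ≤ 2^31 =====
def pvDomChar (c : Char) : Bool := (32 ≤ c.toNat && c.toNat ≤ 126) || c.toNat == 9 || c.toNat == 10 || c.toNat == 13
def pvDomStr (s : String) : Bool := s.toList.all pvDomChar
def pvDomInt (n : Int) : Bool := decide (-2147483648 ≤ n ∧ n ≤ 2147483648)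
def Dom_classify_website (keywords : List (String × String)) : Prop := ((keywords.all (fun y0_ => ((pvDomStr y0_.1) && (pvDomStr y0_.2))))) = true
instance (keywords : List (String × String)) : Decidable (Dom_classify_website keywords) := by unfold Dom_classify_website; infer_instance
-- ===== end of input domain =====

-- B replaces A's inner scan over the category table per keyword by an inverted
-- keyword→category index built once; return value unchanged (idiomatic, same result).

-- the literal `categories` table, shared verbatim by both Pythons
def pvCatTable : List (String × List String) :=
  [("e-commerce", ["shop", "buy", "product", "cart"]),
   ("news", ["news", "breaking", "headline", "report"]),
   ("blog", ["blog", "post", "comment", "subscribe"]),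
   ("social media", ["profile", "friend", "share", "like"])]

-- max(scores, key=scores.get): first key with maximal value (PySem.List.max? is Python max with key)
def pvMaxKey (d : PySem.Dict String Int) : String :=
  (PySem.List.max? d.keys (fun k => d.getD k 0)).getD ""

-- ===== PORT A =====
def classify_website (keywords : List (String × String)) : String :=
  let init : PySem.Dict String Int :=
    pvCatTable.foldl (fun d p => d.insert p.1 0) PySem.Dict.empty
  let scores :=
    keywords.foldl (fun d kw =>
      pvCatTable.foldl (fun d p =>
        if PySem.Str.lower kw.1 ∈ p.2 then d.modify p.1 0 (· + 1) else d) d) init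
  pvMaxKey scores

-- ===== PORT B =====
-- inverted index: {kw: cat for cat, kws in categories.items() for kw in kws}
def pvInvIndex : PySem.Dict String String :=
  pvCatTable.foldl (fun d p => p.2.foldl (fun d w => d.insert w p.1) d) PySem.Dict.empty

def classify_website_alt (keywords : List (String × String)) : String :=
  let scores0 : PySem.Dict String Int :=
    pvCatTable.foldl (fun d p => d.insert p.1 0) PySem.Dict.empty
  let scores :=
    keywords.foldl (fun d kw =>
      match pvInvIndex.get? (PySem.Str.lower kw.1) with
      | some c => d.modify c 0 (· + 1)
      | none => d) scores0
  pvMaxKey scores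

-- ===== PRECONDITION & SPEC =====
def Spec_classify_website (keywords : List (String × String)) (out : String) : Prop := out = classify_website_alt keywords
instance (keywords : List (String × String)) (out : String) : Decidable (Spec_classify_website keywords out) := by unfold Spec_classify_website; infer_instance

-- ===== CLAIM (what is proved, stated in full; the proofs are below) =====
def Claim_equal_classify_website : Prop := ∀ (keywords : List (String × String)), Dom_classify_website keywords → Spec_classify_website keywords (classify_website keywords)

-- ===== LEMMAS AND PROOFS =====

-- per-keyword step of A equals per-keyword step of B, for any lowered keyword s
theorem pv_step_eq (s : String) (d : PySem.Dict String Int) :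
    pvCatTable.foldl (fun d p => if s ∈ p.2 then d.modify p.1 0 (· + 1) else d) d =
    (match pvInvIndex.get? s with
     | some c => d.modify c 0 (· + 1)
     | none => d) := by
  by_cases h0 : s ∈ ["shop","buy","product","cart","news","breaking","headline","report","blog","post","comment","subscribe","profile","friend","share","like"]
  · simp only [List.mem_cons, List.not_mem_nil, or_false] at h0
    rcases h0 with rfl|rfl|rfl|rfl|rfl|rfl|rfl|rfl|rfl|rfl|rfl|rfl|rfl|rfl|rfl|rfl <;> rfl
  · have hg : pvInvIndex.get? s = none := by
      rw [PySem.Dict.get?_eq_none_iff_not_mem_keys]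
      have hk : pvInvIndex.keys = ["shop","buy","product","cart","news","breaking","headline","report","blog","post","comment","subscribe","profile","friend","share","like"] := rfl
      rw [hk]; exact h0
    rw [hg]
    simp only [List.mem_cons, List.not_mem_nil, or_false, not_or] at h0
    simp [pvCatTable, List.mem_cons]
    simp_all

-- the two scoring loops agree from any starting dict
theorem pv_fold_eq (keywords : List (String × String)) (d : PySem.Dict String Int) :
    keywords.foldl (fun d kw =>
      pvCatTable.foldl (fun d p =>
        if PySem.Str.lower kw.1 ∈ p.2 then d.modify p.1 0 (· + 1) else d) d) d =
    keywords.foldl (fun d kw =>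
      match pvInvIndex.get? (PySem.Str.lower kw.1) with
      | some c => d.modify c 0 (· + 1)
      | none => d) d := by
  induction keywords generalizing d with
  | nil => rfl
  | cons kw t ih =>
    simp only [List.foldl_cons]
    rw [pv_step_eq]
    exact ih _

theorem classify_website_spec : Claim_equal_classify_website := by
  intro keywords _
  unfold Spec_classify_website classify_website classify_website_alt
  dsimp only
  exact congrArg pvMaxKey (pv_fold_eq keywords _)
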